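-- pv_equiv track=rewrite | github.com/edwinzrodriguez/ceph-perf-test | scripts/graph_benchmarks.py | identify_swept_variables
-- ===== SOURCE A (Python) =====
-- def identify_swept_variables(results):
--     if not results:
--         return []
--
--     all_keys = set()
--     for entry in results:
--         all_keys.update(entry.keys())
--
--     ignore_cols = {
--         'results_dir', 'file_path', 'extra_args', 'Filesystem Name',
--         'read_bw_bytes', 'write_bw_bytes', 'read_iops', 'write_iops',
--         'agg_bw_mib', 'agg_iops',
--         'Duration', 'Ramp Time' # These might be constant but sometimes vary
--     }
--
--     swept_vars = []
--     for key in all_keys: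
--         if key in ignore_cols or key.startswith("Ganesha"):
--             continue
--
--         values = set()
--         for entry in results:
--             if key in entry:
--                 values.add(str(entry[key]))
--
--         if len(values) > 1:
--             swept_vars.append(key)
--
--     return sorted(swept_vars)
-- ===== SOURCE B (Python) =====
-- def identify_swept_variables(results):
--     ignore_cols = {
--         'results_dir', 'file_path', 'extra_args', 'Filesystem Name',
--         'read_bw_bytes', 'write_bw_bytes', 'read_iops', 'write_iops',
--         'agg_bw_mib', 'agg_iops',
--         'Duration', 'Ramp Time'
--     }
--     values_by_key = {}
--     for entry in results:
--         for key, value in entry.items():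
--             if key in ignore_cols or key.startswith("Ganesha"):
--                 continue
--             values_by_key.setdefault(key, set()).add(str(value))
--     return sorted(key for key, vals in values_by_key.items() if len(vals) > 1)
-- ===== Notes on version B (the rewrite author's own statement) =====
-- stated objective: faster
-- what changed: Replaces the collect-all-keys pass plus a per-key rescan of every entry with a single pass over all entries' items that builds a dict mapping each non-ignored key to the set of values seen, followed by one filter over that table.
import Mathlib
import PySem

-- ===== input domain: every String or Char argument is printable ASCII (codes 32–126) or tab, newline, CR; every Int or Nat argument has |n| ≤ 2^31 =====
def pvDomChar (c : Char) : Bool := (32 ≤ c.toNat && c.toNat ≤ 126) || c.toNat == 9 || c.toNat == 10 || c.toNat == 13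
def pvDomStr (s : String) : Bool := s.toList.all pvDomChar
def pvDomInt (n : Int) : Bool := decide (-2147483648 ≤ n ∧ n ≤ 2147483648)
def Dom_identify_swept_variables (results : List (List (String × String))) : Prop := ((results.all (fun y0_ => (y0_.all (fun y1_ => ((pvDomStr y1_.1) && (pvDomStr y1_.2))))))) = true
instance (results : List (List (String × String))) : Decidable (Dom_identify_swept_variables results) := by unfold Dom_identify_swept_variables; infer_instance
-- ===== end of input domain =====

-- B replaces A's collect-all-keys pass plus per-key rescans of every entry by one pass
-- building a dict key → set of seen values, then a single filter; objective: faster (one pass over all items instead of a rescan of every entry per key).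

-- ===== PORT A =====
-- the ignore_cols set (both Pythons contain this same literal)
def pvIgnoreCols : List String :=
  ["results_dir", "file_path", "extra_args", "Filesystem Name",
   "read_bw_bytes", "write_bw_bytes", "read_iops", "write_iops",
   "agg_bw_mib", "agg_iops", "Duration", "Ramp Time"]

-- `key in ignore_cols or key.startswith("Ganesha")` (identical line in A and B)
def pvIgnored (key : String) : Bool :=
  pvIgnoreCols.contains key || PySem.Str.startswith key "Ganesha"

-- A's inner loop: the set of str(entry[key]) over entries containing key
def pvValuesA (results : List (List (String × String))) (key : String) : PySem.Set String :=
  results.foldl (fun vs entry =>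
    match (PySem.Dict.ofList entry).get? key with
    | some v => PySem.Set.add vs v
    | none => vs) PySem.Set.empty

def identify_swept_variables (results : List (List (String × String))) : List String :=
  if results = [] then []
  else
    -- allKeys: union of every entry's keys; swept: the filtered keys, then sorted
    PySem.List.sorted
      ((results.foldl (fun s entry => PySem.Set.update s (PySem.Dict.ofList entry).keys)
          PySem.Set.empty).foldl (fun acc key =>
        if pvIgnored key then acc
        else if 1 < PySem.Set.len (pvValuesA results key) then acc ++ [key]
        else acc) [])
      (fun x => x) false

-- ===== PORT B =====
-- B's inner loop over entry.items(): record str(value) for each non-ignored key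
def pvStepB (d : PySem.Dict String (PySem.Set String)) (entry : List (String × String)) :
    PySem.Dict String (PySem.Set String) :=
  (PySem.Dict.ofList entry).items.foldl (fun d kv =>
    if pvIgnored kv.1 then d
    else d.insert kv.1 (PySem.Set.add (d.getD kv.1 PySem.Set.empty) kv.2)) d

def identify_swept_variables_alt (results : List (List (String × String))) : List String :=
  PySem.List.sorted
    (((results.foldl pvStepB PySem.Dict.empty).items.filter
        (fun kv => 1 < PySem.Set.len kv.2)).map (fun kv => kv.1))
    (fun x => x) false

-- ===== PRECONDITION & SPEC =====
def Spec_identify_swept_variables (results : List (List (String × String))) (out : List String) : Prop := out = identify_swept_variables_alt results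
instance (results : List (List (String × String))) (out : List String) : Decidable (Spec_identify_swept_variables results out) := by unfold Spec_identify_swept_variables; infer_instance

-- ===== CLAIM (what is proved, stated in full; the proofs are below) =====
def Claim_equal_identify_swept_variables : Prop := ∀ (results : List (List (String × String))), Dom_identify_swept_variables results → Spec_identify_swept_variables results (identify_swept_variables results)

-- ===== LEMMAS AND PROOFS =====

-- A's outer loop collects allKeys filtered by the combined condition
theorem pvFoldA_eq_filter (results : List (List (String × String))) (l acc : List String) :
    l.foldl (fun acc key =>
        if pvIgnored key then acc
        else if 1 < PySem.Set.len (pvValuesA results key) then acc ++ [key]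
        else acc) acc
      = acc ++ l.filter (fun key =>
          !pvIgnored key && decide (1 < PySem.Set.len (pvValuesA results key))) := by
  induction l generalizing acc with
  | nil => simp
  | cons x xs ih =>
    simp only [List.foldl_cons, List.filter_cons, ih]
    by_cases hp : pvIgnored x
    · simp [hp]
    · by_cases hq : 1 < (pvValuesA results x).length <;> simp [hp, hq, PySem.Set.len]

-- membership in the allKeys fold
theorem pv_mem_allKeys (results : List (List (String × String))) (s : PySem.Set String) (k : String) :
    k ∈ results.foldl (fun s entry => PySem.Set.update s (PySem.Dict.ofList entry).keys) s
      ↔ k ∈ s ∨ ∃ e ∈ results, k ∈ (PySem.Dict.ofList e).keys := by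
  induction results generalizing s with
  | nil => simp
  | cons e es ih =>
    simp only [List.foldl_cons, ih, PySem.Set.mem_update, List.mem_cons]
    constructor
    · rintro ((h | h) | ⟨e', he', hk⟩)
      · exact Or.inl h
      · exact Or.inr ⟨e, Or.inl rfl, h⟩
      · exact Or.inr ⟨e', Or.inr he', hk⟩
    · rintro (h | ⟨e', (rfl | he'), hk⟩)
      · exact Or.inl (Or.inl h)
      · exact Or.inl (Or.inr hk)
      · exact Or.inr ⟨e', he', hk⟩

theorem pv_nodup_allKeys (results : List (List (String × String))) (s : PySem.Set String)
    (hs : s.Nodup) :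
    (results.foldl (fun s entry => PySem.Set.update s (PySem.Dict.ofList entry).keys) s).Nodup := by
  induction results generalizing s with
  | nil => exact hs
  | cons e es ih => exact ih _ (PySem.Set.nodup_update _ _ hs)

-- first-match lookup on a pair list with distinct keys is list membership
theorem pv_get?_iff_mem {ν : Type} (ps : List (String × ν)) (h : (ps.map Prod.fst).Nodup)
    (k : String) (v : ν) :
    (PySem.Dict.mk ps).get? k = some v ↔ (k, v) ∈ ps := by
  induction ps with
  | nil => simp [PySem.Dict.get?]
  | cons a rest ih =>
    obtain ⟨a1, a2⟩ := a
    simp only [List.map_cons, List.nodup_cons] at h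
    rw [PySem.Dict.get?_mk_cons]
    by_cases hk : a1 = k
    · subst hk
      simp only [beq_self_eq_true, if_true, List.mem_cons, Option.some_inj, Prod.mk.injEq,
        true_and]
      constructor
      · rintro rfl; exact Or.inl rfl
      · rintro (hv | hmem)
        · exact hv.symm
        · exact absurd (List.mem_map_of_mem (f := Prod.fst) hmem) (by simpa using h.1)
    · simp only [beq_iff_eq, hk, if_false, ih h.2, List.mem_cons, Prod.mk.injEq]
      constructor
      · exact Or.inr
      · rintro (⟨h1, _⟩ | hmem)
        · exact absurd h1.symm hk
        · exact hmem

-- a dict's lookup misses exactly outside its keys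
theorem pv_get?_eq_none_iff {ν : Type} (d : PySem.Dict String ν) (k : String) :
    d.get? k = none ↔ k ∉ d.keys := by
  simp only [PySem.Dict.get?, Option.map_eq_none_iff, List.find?_eq_none, PySem.Dict.keys,
    List.mem_map, beq_iff_eq]
  constructor
  · rintro h ⟨p, hp, rfl⟩
    exact h p hp rfl
  · rintro h p hp rfl
    exact h ⟨p, hp, rfl⟩

-- keys of an insert
theorem pv_keys_insert {ν : Type} (d : PySem.Dict String ν) (k : String) (v : ν) :
    (d.insert k v).keys = PySem.Set.add d.keys k := by
  have hck : (d.contains k = true) ↔ (PySem.Set.contains d.keys k = true) := by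
    simp only [PySem.Dict.contains, PySem.Set.contains, PySem.Dict.keys,
      List.contains_eq_any_beq, List.any_map, List.any_eq_true, Function.comp_apply,
      beq_iff_eq]
    constructor
    · rintro ⟨p, hp, rfl⟩; exact ⟨p, hp, rfl⟩
    · rintro ⟨p, hp, rfl⟩; exact ⟨p, hp, rfl⟩
  unfold PySem.Dict.insert PySem.Set.add
  by_cases h : d.contains k = true
  · rw [if_pos h, if_pos (hck.mp h)]
    simp only [PySem.Dict.keys, List.map_map]
    apply List.map_congr_left
    intro p _
    by_cases hp : p.1 == k
    · simp only [Function.comp, hp, if_true]; exact (eq_of_beq hp).symm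
    · simp [Function.comp, hp]
  · rw [if_neg h, if_neg (fun hh => h (hck.mpr hh))]
    simp [PySem.Dict.keys]

-- slot k of B's per-entry fold over a pair list with distinct keys
theorem pv_slot_entry (ps : List (String × String)) (h : (ps.map Prod.fst).Nodup)
    (d : PySem.Dict String (PySem.Set String)) (k : String) :
    (ps.foldl (fun d kv =>
        if pvIgnored kv.1 then d
        else d.insert kv.1 (PySem.Set.add (d.getD kv.1 PySem.Set.empty) kv.2)) d).getD k PySem.Set.empty
      = if pvIgnored k then d.getD k PySem.Set.empty
        else match (PySem.Dict.mk ps).get? k with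
          | some v => PySem.Set.add (d.getD k PySem.Set.empty) v
          | none => d.getD k PySem.Set.empty := by
  induction ps generalizing d with
  | nil => simp [PySem.Dict.get?]
  | cons a rest ih =>
    obtain ⟨a1, a2⟩ := a
    simp only [List.map_cons, List.nodup_cons] at h
    simp only [List.foldl_cons]
    rw [ih h.2, PySem.Dict.get?_mk_cons]
    by_cases hik : pvIgnored k
    · rw [if_pos hik, if_pos hik]
      by_cases ha : pvIgnored a1
      · rw [if_pos ha]
      · rw [if_neg ha, PySem.Dict.getD_insert]
        rw [if_neg (fun (hk : k = a1) => ha (hk ▸ hik))]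
    · rw [if_neg hik, if_neg hik]
      by_cases hk : a1 = k
      · subst hk
        have ha1 : ¬ pvIgnored a1 := hik
        rw [if_neg ha1]
        have hrest : (PySem.Dict.mk rest).get? a1 = none := by
          simp only [PySem.Dict.get?, Option.map_eq_none_iff, List.find?_eq_none]
          intro p hp
          simp only [beq_iff_eq]
          intro hpk
          exact h.1 (hpk ▸ List.mem_map_of_mem (f := Prod.fst) hp)
        rw [hrest, beq_self_eq_true, if_pos rfl]
        simp
      · have hbk : (a1 == k) = false := by simpa using hk
        rw [hbk]
        simp only [Bool.false_eq_true, if_false]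
        by_cases ha : pvIgnored a1
        · rw [if_pos ha]
        · rw [if_neg ha, PySem.Dict.getD_insert, if_neg (fun hh => hk hh.symm)]

-- slot k of the whole table fold
theorem pv_slot_table (results : List (List (String × String)))
    (d : PySem.Dict String (PySem.Set String)) (k : String) :
    (results.foldl pvStepB d).getD k PySem.Set.empty
      = if pvIgnored k then d.getD k PySem.Set.empty
        else results.foldl (fun vs entry =>
            match (PySem.Dict.ofList entry).get? k with
            | some v => PySem.Set.add vs v
            | none => vs) (d.getD k PySem.Set.empty) := by
  induction results generalizing d with
  | nil => simp
  | cons e es ih =>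
    simp only [List.foldl_cons, ih]
    have hn : ((PySem.Dict.ofList e).items.map Prod.fst).Nodup := by
      have := PySem.Dict.nodup_keys_ofList (ps := e)
      simpa [PySem.Dict.keys] using this
    have hstep := pv_slot_entry (PySem.Dict.ofList e).items hn d k
    have heta : (PySem.Dict.mk (PySem.Dict.ofList e).items) = PySem.Dict.ofList e := rfl
    rw [heta] at hstep
    simp only [pvStepB]
    rw [hstep]
    by_cases hik : pvIgnored k
    · simp [hik]
    · simp [hik]

-- the table's keys stay duplicate-free (per entry, then over all entries)
theorem pv_nodup_entry_keys (ps : List (String × String))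
    (d : PySem.Dict String (PySem.Set String)) (hd : d.keys.Nodup) :
    ((ps.foldl (fun d kv =>
        if pvIgnored kv.1 then d
        else d.insert kv.1 (PySem.Set.add (d.getD kv.1 PySem.Set.empty) kv.2)) d).keys).Nodup := by
  induction ps generalizing d with
  | nil => exact hd
  | cons a rest ih =>
    simp only [List.foldl_cons]
    apply ih
    by_cases ha : pvIgnored a.1
    · rw [if_pos ha]; exact hd
    · rw [if_neg ha, pv_keys_insert]; exact PySem.Set.nodup_add _ _ hd

theorem pv_nodup_table_keys (results : List (List (String × String)))
    (d : PySem.Dict String (PySem.Set String)) (hd : d.keys.Nodup) :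
    (results.foldl pvStepB d).keys.Nodup := by
  induction results generalizing d with
  | nil => exact hd
  | cons e es ih => exact ih _ (pv_nodup_entry_keys _ _ hd)

-- a values fold over entries that never contain the key is constant
theorem pv_values_const (results : List (List (String × String))) (k : String)
    (vs : PySem.Set String) (h : ∀ e ∈ results, (PySem.Dict.ofList e).get? k = none) :
    results.foldl (fun vs entry =>
        match (PySem.Dict.ofList entry).get? k with
        | some v => PySem.Set.add vs v
        | none => vs) vs = vs := by
  induction results generalizing vs with
  | nil => rfl
  | cons e es ih =>
    simp only [List.foldl_cons, h e (List.mem_cons_self)]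
    exact ih _ (fun e' he' => h e' (List.mem_cons_of_mem _ he'))

-- ===== VERDICT (by name: the statement is the Claim_ definition above) =====
theorem identify_swept_variables_spec : Claim_equal_identify_swept_variables := by
  intro results _
  show identify_swept_variables results = identify_swept_variables_alt results
  unfold identify_swept_variables identify_swept_variables_alt
  by_cases hres : results = []
  · subst hres; rfl
  · rw [if_neg hres]
    rw [pvFoldA_eq_filter results _ []]
    set table := results.foldl pvStepB PySem.Dict.empty with htable
    set allKeys := results.foldl
      (fun s entry => PySem.Set.update s (PySem.Dict.ofList entry).keys) PySem.Set.empty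
      with hak
    have hkn : table.keys.Nodup := pv_nodup_table_keys results PySem.Dict.empty (by simp [PySem.Dict.empty, PySem.Dict.keys])
    have hslot : ∀ k, table.getD k PySem.Set.empty
        = if pvIgnored k then PySem.Set.empty else pvValuesA results k := by
      intro k
      rw [htable, pv_slot_table]
      rfl
    apply PySem.List.sorted_eq_sorted_of_perm _ _ _ (fun _ _ h => h)
    rw [List.perm_ext_iff_of_nodup]
    · intro k
      rw [List.nil_append, List.mem_filter, List.mem_map]
      constructor
      · rintro ⟨hmem, hP⟩
        rw [Bool.and_eq_true, Bool.not_eq_eq_eq_not, Bool.not_true, decide_eq_true_iff] at hP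
        obtain ⟨hig, hlen⟩ := hP
        -- table.get? k = some (pvValuesA results k)
        have hgd : table.getD k PySem.Set.empty = pvValuesA results k := by
          rw [hslot k, if_neg (by simp [hig])]
        have hsome : table.get? k = some (pvValuesA results k) := by
          cases hg : table.get? k with
          | none =>
            exfalso
            have : table.getD k PySem.Set.empty = PySem.Set.empty := by
              simp [PySem.Dict.getD, hg]
            rw [hgd] at this
            rw [this] at hlen
            simp [PySem.Set.len, PySem.Set.empty] at hlen
          | some v =>
            have : table.getD k PySem.Set.empty = v := by simp [PySem.Dict.getD, hg]
            rw [hgd] at this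
            rw [this]
        refine ⟨(k, pvValuesA results k), ?_, rfl⟩
        rw [List.mem_filter]
        constructor
        · exact (pv_get?_iff_mem table.items hkn k _).mp hsome
        · simpa using hlen
      · rintro ⟨⟨k', v⟩, hkv, rfl⟩
        rw [List.mem_filter] at hkv
        obtain ⟨hmem, hlen⟩ := hkv
        have hsome : table.get? k' = some v := (pv_get?_iff_mem table.items hkn k' v).mpr hmem
        have hgd : table.getD k' PySem.Set.empty = v := by simp [PySem.Dict.getD, hsome]
        simp only [decide_eq_true_iff] at hlen
        have hig : ¬ pvIgnored k' := by
          intro hig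
          rw [hslot k', if_pos hig] at hgd
          rw [← hgd] at hlen
          simp [PySem.Set.len, PySem.Set.empty] at hlen
        have hv : v = pvValuesA results k' := by
          rw [hslot k', if_neg hig] at hgd
          exact hgd.symm
        subst hv
        constructor
        · -- k' appears in some entry, hence in allKeys
          rw [hak, pv_mem_allKeys]
          right
          by_contra hno
          push Not at hno
          have : pvValuesA results k' = PySem.Set.empty := by
            apply pv_values_const
            intro e he
            rw [pv_get?_eq_none_iff]
            exact hno e he
          rw [this] at hlen
          simp [PySem.Set.len, PySem.Set.empty] at hlen
        · simp only [hig, Bool.not_false, Bool.true_and, decide_eq_true_eq]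
          simpa [PySem.Set.len] using hlen
    · exact List.Nodup.filter _ (by rw [hak]; exact pv_nodup_allKeys results _ List.nodup_nil)
    · have hsub : ((table.items.filter (fun kv => 1 < PySem.Set.len kv.2)).map (fun kv => kv.1)).Sublist
          (table.items.map (fun kv => kv.1)) :=
        List.Sublist.map (fun kv : String × PySem.Set String => kv.1)
          (List.filter_sublist (l := table.items))
      exact hsub.nodup hkn
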